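-- pv_equiv track=rewrite | github.com/dgomezbau/Ejercicios-Python | Hoja03/Hoja03_ej02.py | habitual_to_militar
-- ===== SOURCE A (Python) =====
-- def habitual_to_militar(hora_hab):
--     cont = 0
--     horas = ''
--     minutos = ''
--     hora_mili = ''
--     for i in hora_hab:
--         if cont <=1:
--             horas = horas + i
--         elif cont >2 and cont<=4:
--             minutos = minutos + i
--         elif cont == 5:
--             if i == 'P':
--                 horas = str(int(horas)+12)
--         cont = cont + 1
--
--     hora_mili = horas + minutos
--
--     return hora_mili
-- ===== SOURCE B (Python) =====
-- def habitual_to_militar(hora_hab):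
--     horas = hora_hab[0:2]
--     minutos = hora_hab[3:5]
--     if len(hora_hab) > 5 and hora_hab[5] == 'P':
--         horas = str(int(horas) + 12)
--     return horas + minutos
-- ===== Notes on version B (the rewrite author's own statement) =====
-- stated objective: simpler
-- what changed: Replaces the character-by-character loop with a position counter and accumulator strings by direct positional slicing (hora_hab[0:2], hora_hab[3:5]) plus one guarded check of the character at index 5 for PM; B never scans past index 5, so it is also measurably faster on long strings.
import Mathlib
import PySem

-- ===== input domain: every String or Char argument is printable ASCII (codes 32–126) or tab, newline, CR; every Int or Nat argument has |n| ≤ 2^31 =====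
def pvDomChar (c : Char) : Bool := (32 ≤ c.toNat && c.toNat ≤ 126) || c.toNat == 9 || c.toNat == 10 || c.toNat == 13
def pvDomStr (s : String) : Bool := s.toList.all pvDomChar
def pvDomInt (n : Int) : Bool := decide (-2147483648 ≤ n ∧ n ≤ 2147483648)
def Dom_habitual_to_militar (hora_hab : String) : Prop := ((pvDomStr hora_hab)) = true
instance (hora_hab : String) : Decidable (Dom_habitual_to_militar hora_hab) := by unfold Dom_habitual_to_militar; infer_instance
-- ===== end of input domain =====

-- B replaces A's counter-driven character loop by direct positional slicing; objective: simpler.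

-- ===== PORT A =====
-- loop body of A: state is (cont, horas, minutos); strings kept as List Char
def pvStepA (st : Int × List Char × List Char) (i : Char) : Int × List Char × List Char :=
  let cont := st.1
  let horas := st.2.1
  let minutos := st.2.2
  if cont ≤ 1 then (cont + 1, horas ++ [i], minutos)
  else if 2 < cont ∧ cont ≤ 4 then (cont + 1, horas, minutos ++ [i])
  else if cont = 5 then
    if i = 'P' then
      (cont + 1,
        (match PySem.Int.ofChars? horas with
         | some n => (PySem.Int.toStr (n + 12)).toList
         | none => horas),   -- int() raises ValueError here in Python; excluded by Pre_
        minutos)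
    else (cont + 1, horas, minutos)
  else (cont + 1, horas, minutos)

def habitual_to_militar (hora_hab : String) : String :=
  let r := hora_hab.toList.foldl pvStepA (0, [], [])
  String.mk (r.2.1 ++ r.2.2)

-- ===== PORT B =====
def habitual_to_militar_alt (hora_hab : String) : String :=
  let l := hora_hab.toList
  let horas := PySem.List.slice l (some 0) (some 2)
  let minutos := PySem.List.slice l (some 3) (some 5)
  let horas' :=
    if 5 < (l.length : Int) ∧ PySem.List.pyGet? l 5 = some 'P' then
      match PySem.Int.ofChars? horas with
      | some n => (PySem.Int.toStr (n + 12)).toList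
      | none => horas   -- int() raises ValueError here in Python; excluded by Pre_
    else horas
  String.mk (horas' ++ minutos)

-- ===== PRECONDITION & SPEC =====
-- Pre_ excludes exactly the inputs whose character at index 5 is 'P' while the first two
-- characters do not parse as a Python int: there A (and B alike) raise ValueError from int().
def Pre_habitual_to_militar (hora_hab : String) : Prop :=
  hora_hab.toList[5]? = some 'P' →
    (PySem.Int.ofChars? (hora_hab.toList.take 2)).isSome = true
instance (hora_hab : String) : Decidable (Pre_habitual_to_militar hora_hab) := by
  unfold Pre_habitual_to_militar; infer_instance

def pvWitness_habitual_to_militar : String := "10:30PM"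

def Spec_habitual_to_militar (hora_hab : String) (out : String) : Prop := out = habitual_to_militar_alt hora_hab
instance (hora_hab : String) (out : String) : Decidable (Spec_habitual_to_militar hora_hab out) := by unfold Spec_habitual_to_militar; infer_instance

-- ===== CLAIM (what is proved, stated in full; the proofs are below) =====
def Claim_equal_habitual_to_militar : Prop := ∀ (hora_hab : String), Dom_habitual_to_militar hora_hab → Pre_habitual_to_militar hora_hab → Spec_habitual_to_militar hora_hab (habitual_to_militar hora_hab)

-- ===== LEMMAS AND PROOFS =====

-- once cont ≥ 6 the loop body of A never changes horas/minutos again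
lemma foldA_ge6 (l : List Char) : ∀ (c : Int) (h m : List Char), 6 ≤ c →
    (List.foldl pvStepA (c, h, m) l).2 = (h, m) := by
  induction l with
  | nil => intro c h m _; rfl
  | cons x xs ih =>
      intro c h m hc
      have h1 : ¬ c ≤ 1 := by omega
      have h2 : ¬ (2 < c ∧ c ≤ 4) := by omega
      have h3 : c ≠ 5 := by omega
      simp only [List.foldl_cons, pvStepA, h1, h2, h3, if_false]
      exact ih (c + 1) h m (by omega)

-- B's computation at the List Char level (definitionally the body of habitual_to_militar_alt)
def pvBfun (l : List Char) : List Char :=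
  let horas := PySem.List.slice l (some 0) (some 2)
  let minutos := PySem.List.slice l (some 3) (some 5)
  let horas' :=
    if 5 < (l.length : Int) ∧ PySem.List.pyGet? l 5 = some 'P' then
      match PySem.Int.ofChars? horas with
      | some n => (PySem.Int.toStr (n + 12)).toList
      | none => horas
    else horas
  horas' ++ minutos

lemma foldA_eq_pvBfun (l : List Char) :
    (l.foldl pvStepA (0, [], [])).2.1 ++ (l.foldl pvStepA (0, [], [])).2.2 = pvBfun l := by
  rcases l with _ | ⟨a, _ | ⟨b, _ | ⟨c, _ | ⟨d, _ | ⟨e, _ | ⟨f, rest⟩⟩⟩⟩⟩⟩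
  · decide
  · simp [pvStepA, pvBfun, PySem.List.slice, PySem.List.clampIdx, PySem.List.pyGet?, PySem.List.pyIdx?]
  · simp [pvStepA, pvBfun, PySem.List.slice, PySem.List.clampIdx, PySem.List.pyGet?, PySem.List.pyIdx?]
  · simp [pvStepA, pvBfun, PySem.List.slice, PySem.List.clampIdx, PySem.List.pyGet?, PySem.List.pyIdx?]
  · simp [pvStepA, pvBfun, PySem.List.slice, PySem.List.clampIdx, PySem.List.pyGet?, PySem.List.pyIdx?]
  · simp [pvStepA, pvBfun, PySem.List.slice, PySem.List.clampIdx, PySem.List.pyGet?, PySem.List.pyIdx?]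
  · have h6 := foldA_ge6 rest 6
    have h5 : (5:Int) ≤ (rest.length:Int) + 1 + 1 + 1 + 1 + 1 := by omega
    have hg : (a :: b :: c :: d :: e :: f :: rest)[(5:Nat)]? = some f := rfl
    by_cases hP : f = 'P' <;>
      simp [pvStepA, pvBfun, PySem.List.slice, PySem.List.clampIdx, PySem.List.pyGet?,
            PySem.List.pyIdx?, hP, h6, h5, hg]

-- ===== VERDICT (by name: the statement is the Claim_ definition above) =====
theorem habitual_to_militar_spec : Claim_equal_habitual_to_militar := by
  intro s _ _
  show habitual_to_militar s = habitual_to_militar_alt s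
  exact congrArg String.mk (foldA_eq_pvBfun s.toList)
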